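-- pv_equiv track=rewrite | github.com/module6create2020/tutorial-02-afehnker | exercises/python102.py | letter2words_histogram
-- ===== SOURCE A (Python) =====
-- def letter2words_histogram(s):
--     word_dict = dict()
--     for w in s.lower().split():
--         for l in w:
--             if l in word_dict:
--                 word_dict[l].add(w)
--             else:
--                 word_dict[l] = {w}
--     return word_dict
-- ===== SOURCE B (Python) =====
-- def letter2words_histogram(s):
--     words = s.lower().split()
--     letters = dict.fromkeys(c for w in words for c in w)
--     return {c: {w for w in words if c in w} for c in letters}
-- ===== Notes on version B (the rewrite author's own statement) =====
-- stated objective: alternative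
-- what changed: A builds the dict in one word-major character sweep, upserting a set per letter occurrence; B first computes the ordered set of distinct letters and then builds the result letter-major, scanning the word list once per letter.
import Mathlib
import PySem

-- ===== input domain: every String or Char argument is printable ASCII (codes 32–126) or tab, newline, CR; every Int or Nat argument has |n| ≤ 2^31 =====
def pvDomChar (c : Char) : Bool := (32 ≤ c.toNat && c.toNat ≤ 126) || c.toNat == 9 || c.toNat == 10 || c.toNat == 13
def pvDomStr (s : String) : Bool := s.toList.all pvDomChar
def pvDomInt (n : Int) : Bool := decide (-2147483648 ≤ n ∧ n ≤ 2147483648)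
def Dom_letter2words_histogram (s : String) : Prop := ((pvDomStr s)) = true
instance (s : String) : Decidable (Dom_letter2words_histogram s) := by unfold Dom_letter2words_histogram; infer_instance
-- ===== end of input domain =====

-- B replaces A's word-major dict-upsert sweep with a letter-major construction (distinct letters first, then one scan of the word list per letter); objective: alternative decomposition.

-- ===== PORT A =====
def letter2words_histogram (s : String) : List (String × List String) :=
  (((PySem.Str.split₀ (PySem.Str.lower s)).foldl
    (fun (d : PySem.Dict String (PySem.Set String)) w =>
      (w.toList.map (fun c => String.ofList [c])).foldl
        (fun d l =>
          if d.contains l then d.insert l (PySem.Set.add (d.getD l PySem.Set.empty) w)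
          else d.insert l (PySem.Set.ofList [w]))
        d)
    PySem.Dict.empty) : PySem.Dict String (PySem.Set String)).items


-- ===== PORT B =====
def letter2words_histogram_alt (s : String) : List (String × List String) :=
  let words := PySem.Str.split₀ (PySem.Str.lower s)
  let letters := PySem.List.dedup (words.flatMap (fun w => w.toList.map (fun c => String.ofList [c])))
  letters.map (fun c => (c, PySem.Set.ofList (words.filter (fun w => PySem.Str.isIn c w))))


-- ===== PRECONDITION & SPEC =====
def Spec_letter2words_histogram (s : String) (out : List (String × List String)) : Prop := out = letter2words_histogram_alt s
instance (s : String) (out : List (String × List String)) : Decidable (Spec_letter2words_histogram s out) := by unfold Spec_letter2words_histogram; infer_instance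

-- ===== CLAIM (what is proved, stated in full; the proofs are below) =====
def Claim_equal_letter2words_histogram : Prop := ∀ (s : String), Dom_letter2words_histogram s → Spec_letter2words_histogram s (letter2words_histogram s)

-- ===== LEMMAS AND PROOFS =====

theorem isIn_single (ch : Char) (u : String) : PySem.Str.isIn (String.ofList [ch]) u = true ↔ ch ∈ u.toList := by
  rw [PySem.Str.isIn_iff_infix]
  simp [List.singleton_infix_iff]

theorem mem_map_ofList (ch : Char) (l : List Char) :
    String.ofList [ch] ∈ l.map (fun c => String.ofList [c]) ↔ ch ∈ l := by
  simp only [List.mem_map]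
  constructor
  · rintro ⟨a, ha, h⟩
    have := congrArg String.toList h
    simp at this; subst this; exact ha
  · exact fun h => ⟨ch, h, rfl⟩

theorem step_lemma (S : String → PySem.Set String) (w : String) (L : List String)
    (l : String) (hl : l ∉ L → S l = []) (p : List String) :
    (if (PySem.Dict.mk ((PySem.Set.ofList (L ++ p)).map
          (fun c => (c, if c ∈ p then PySem.Set.add (S c) w else S c))) : PySem.Dict String (PySem.Set String)).contains l then
        (PySem.Dict.mk ((PySem.Set.ofList (L ++ p)).map
          (fun c => (c, if c ∈ p then PySem.Set.add (S c) w else S c)))).insert l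
          (PySem.Set.add ((PySem.Dict.mk ((PySem.Set.ofList (L ++ p)).map
            (fun c => (c, if c ∈ p then PySem.Set.add (S c) w else S c)))).getD l PySem.Set.empty) w)
      else (PySem.Dict.mk ((PySem.Set.ofList (L ++ p)).map
          (fun c => (c, if c ∈ p then PySem.Set.add (S c) w else S c)))).insert l (PySem.Set.ofList [w]))
    = PySem.Dict.mk ((PySem.Set.ofList (L ++ (p ++ [l]))).map
          (fun c => (c, if c ∈ p ++ [l] then PySem.Set.add (S c) w else S c))) := by
  set D := PySem.Set.ofList (L ++ p) with hD
  set g := fun c => (c, if c ∈ p then PySem.Set.add (S c) w else S c) with hg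
  have hDnodup : D.Nodup := PySem.Set.nodup_ofList _
  have hkeys : (PySem.Dict.mk (D.map g)).keys = D := by
    simp [PySem.Dict.keys_mk, List.map_map, hg, Function.comp_def]
  have hofr : PySem.Set.ofList (L ++ (p ++ [l])) = PySem.Set.add D l := by
    rw [hD, ← List.append_assoc, PySem.Set.ofList_append_singleton]
  by_cases hmem : l ∈ L ++ p
  · have hlD : l ∈ D := (PySem.Set.mem_ofList _ _).mpr hmem
    have hc : (PySem.Dict.mk (D.map g)).contains l = true := by
      rw [PySem.Dict.contains_iff_mem_keys, hkeys]; exact hlD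
    rw [if_pos hc]
    have hgetD : (PySem.Dict.mk (D.map g)).getD l PySem.Set.empty
        = (if l ∈ p then PySem.Set.add (S l) w else S l) := by
      apply PySem.Dict.getD_of_mem_items
      · exact List.mem_map_of_mem (f := g) hlD
      · rw [hkeys]; exact hDnodup
    apply PySem.Dict.ext
    rw [PySem.Dict.items_insert_of_contains _ _ hc, hgetD]
    show (D.map g).map _ = (PySem.Set.ofList (L ++ (p ++ [l]))).map _
    rw [hofr, PySem.Set.add_of_mem hlD, List.map_map]
    apply List.map_congr_left
    intro c hc'
    by_cases hcl : c = l
    · subst hcl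
      simp only [Function.comp, hg, beq_self_eq_true]
      by_cases hp : c ∈ p <;> simp [hp]
    · simp only [Function.comp, hg]
      have : (c == l) = false := by simp [hcl]
      simp only [this, Bool.false_eq_true, if_false]
      have : (c ∈ p ++ [l]) ↔ c ∈ p := by simp [hcl]
      simp [this]
  · have hlD : l ∉ D := fun h => hmem ((PySem.Set.mem_ofList _ _).mp h)
    have hc : (PySem.Dict.mk (D.map g)).contains l = false := by
      rw [← Bool.not_eq_true, PySem.Dict.contains_iff_mem_keys, hkeys]; exact hlD
    rw [hc]
    simp only [Bool.false_eq_true, if_false]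
    apply PySem.Dict.ext
    rw [PySem.Dict.items_insert_of_not_contains _ _ hc]
    show D.map g ++ [(l, PySem.Set.ofList [w])] = _
    rw [hofr, PySem.Set.add_of_not_mem hlD, List.map_append]
    congr 1
    · apply List.map_congr_left
      intro c hc'
      have hcl : c ≠ l := fun h => hlD (h ▸ hc')
      have : (c ∈ p ++ [l]) ↔ c ∈ p := by simp [hcl]
      simp [hg, this]
    · have hSl : S l = [] := hl (fun h => hmem (List.mem_append_left _ h))
      simp [hSl, PySem.Set.ofList]

theorem inner_lemma (S : String → PySem.Set String) (w : String) (L : List String)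
    (q : List String) (hq : ∀ l ∈ q, l ∉ L → S l = [])
    (p : List String) :
    q.foldl (fun d l =>
          if d.contains l then d.insert l (PySem.Set.add (d.getD l PySem.Set.empty) w)
          else d.insert l (PySem.Set.ofList [w]))
      (PySem.Dict.mk ((PySem.Set.ofList (L ++ p)).map
          (fun c => (c, if c ∈ p then PySem.Set.add (S c) w else S c))))
    = PySem.Dict.mk ((PySem.Set.ofList (L ++ (p ++ q))).map
          (fun c => (c, if c ∈ p ++ q then PySem.Set.add (S c) w else S c))) := by
  induction q generalizing p with
  | nil => simp
  | cons l q ih =>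
    rw [List.foldl_cons, step_lemma S w L l (hq l (by simp)) p,
        ih (fun x hx => hq x (by simp [hx])) (p ++ [l])]
    simp

theorem dict_loop (ws : List String) :
    ((ws.foldl (fun (d : PySem.Dict String (PySem.Set String)) w =>
        (w.toList.map (fun c => String.ofList [c])).foldl
          (fun d l =>
            if d.contains l then d.insert l (PySem.Set.add (d.getD l PySem.Set.empty) w)
            else d.insert l (PySem.Set.ofList [w]))
          d)
      PySem.Dict.empty)).items
    = (PySem.Set.ofList (ws.flatMap (fun w => w.toList.map (fun c => String.ofList [c])))).map
        (fun c => (c, PySem.Set.ofList (ws.filter (fun w => PySem.Str.isIn c w)))) := by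
  induction ws using List.reverseRecOn with
  | nil => rfl
  | append_singleton us w ih =>
    rw [List.foldl_append, List.foldl_cons, List.foldl_nil]
    have hd : (us.foldl (fun (d : PySem.Dict String (PySem.Set String)) w =>
        (w.toList.map (fun c => String.ofList [c])).foldl
          (fun d l =>
            if d.contains l then d.insert l (PySem.Set.add (d.getD l PySem.Set.empty) w)
            else d.insert l (PySem.Set.ofList [w]))
          d)
      PySem.Dict.empty)
      = PySem.Dict.mk ((PySem.Set.ofList ((us.flatMap (fun w => w.toList.map (fun c => String.ofList [c]))) ++ ([] : List String))).map
          (fun c => (c, if c ∈ ([] : List String) then PySem.Set.add ((PySem.Set.ofList (us.filter (fun u => PySem.Str.isIn c u)))) w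
                        else PySem.Set.ofList (us.filter (fun u => PySem.Str.isIn c u))))) := by
      apply PySem.Dict.ext
      simpa using ih
    rw [hd, inner_lemma (fun c => PySem.Set.ofList (us.filter (fun u => PySem.Str.isIn c u))) w _ _ ?hq []]
    case hq =>
      intro l hl hnotst
      simp only [List.mem_map] at hl
      obtain ⟨ch, hch, rfl⟩ := hl
      show PySem.Set.ofList (us.filter (fun u => PySem.Str.isIn (String.ofList [ch]) u)) = []
      have : us.filter (fun u => PySem.Str.isIn (String.ofList [ch]) u) = [] := by
        rw [List.filter_eq_nil_iff]
        intro u hu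
        simp only [Bool.not_eq_true]
        by_contra hcon
        simp only [Bool.not_eq_false] at hcon
        apply hnotst
        rw [List.mem_flatMap]
        exact ⟨u, hu, (mem_map_ofList ch u.toList).mpr ((isIn_single ch u).mp hcon)⟩
      rw [this]; rfl
    show List.map _ _ = _
    rw [List.flatMap_append]
    simp only [List.flatMap_cons, List.flatMap_nil, List.append_nil, List.nil_append]
    apply List.map_congr_left
    intro c hc
    have hsingle : ∃ ch, c = String.ofList [ch] := by
      rw [PySem.Set.mem_ofList, List.mem_append] at hc
      rcases hc with h | h
      · rw [List.mem_flatMap] at h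
        obtain ⟨u, _, hu⟩ := h
        obtain ⟨ch, _, rfl⟩ := List.mem_map.mp hu
        exact ⟨ch, rfl⟩
      · obtain ⟨ch, _, rfl⟩ := List.mem_map.mp h
        exact ⟨ch, rfl⟩
    obtain ⟨ch, rfl⟩ := hsingle
    rw [List.filter_append]
    by_cases hin : ch ∈ w.toList
    · have h1 : String.ofList [ch] ∈ w.toList.map (fun c => String.ofList [c]) := (mem_map_ofList ch _).mpr hin
      have h2 : PySem.Str.isIn (String.ofList [ch]) w = true := (isIn_single ch w).mpr hin
      simp only [h1, if_pos, List.filter_cons, h2, List.filter_nil]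
      rw [PySem.Set.ofList_append_singleton]
    · have h1 : String.ofList [ch] ∉ w.toList.map (fun c => String.ofList [c]) := fun h => hin ((mem_map_ofList ch _).mp h)
      have h2 : PySem.Str.isIn (String.ofList [ch]) w = false := by
        rw [← Bool.not_eq_true]; exact fun h => hin ((isIn_single ch w).mp h)
      simp only [h1, if_false, List.filter_cons, h2, Bool.false_eq_true, List.filter_nil,
        List.append_nil]

-- ===== VERDICT (by name: the statement is the Claim_ definition above) =====
theorem letter2words_histogram_spec : Claim_equal_letter2words_histogram := by
  intro s _
  unfold Spec_letter2words_histogram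
  simp only [letter2words_histogram, letter2words_histogram_alt, PySem.List.dedup_eq_ofList]
  exact dict_loop _
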